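-- pv_equiv track=rewrite | github.com/GilYairYamin/Google-s-FooBar | Level 3/doomsday-fuel/solution.py | findSwapIndecies
-- ===== SOURCE A (Python) =====
-- def findStable(m):
--     stable = []
--     for row in m:
--         test = True
--         for num in row:
--             if num != 0:
--                 test = False
--                 break
--
--         stable.append(test)
--     return stable
--
-- def findSwapIndecies(m):
--     stable = findStable(m)
--     newOrder = []
--     count = 0
--     for i in range(len(stable)):
--         if stable[i]:
--             newOrder.append(i)
--             count += 1
--
--     for i in range(len(stable)):
--         if not stable[i]:
--             newOrder.append(i)
--
--     swapIndecies = [0 for i in range(len(stable))]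
--     for i in range(len(stable)):
--         swapIndecies[newOrder[i]] = i
--
--     return (count, swapIndecies)
-- ===== SOURCE B (Python) =====
-- def findSwapIndecies(m):
--     flags = [all(x == 0 for x in row) for row in m]
--     count = sum(flags)
--     swap = []
--     s, u = 0, count
--     for f in flags:
--         if f:
--             swap.append(s)
--             s += 1
--         else:
--             swap.append(u)
--             u += 1
--     return (count, swap)
-- ===== Notes on version B (the rewrite author's own statement) =====
-- stated objective: simpler
-- what changed: Instead of building the forward ordering list (stable indices then unstable indices) and then inverting it with an index-assignment pass, B emits the inverse permutation directly in one pass over the stable flags with two running counters.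
import Mathlib
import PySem

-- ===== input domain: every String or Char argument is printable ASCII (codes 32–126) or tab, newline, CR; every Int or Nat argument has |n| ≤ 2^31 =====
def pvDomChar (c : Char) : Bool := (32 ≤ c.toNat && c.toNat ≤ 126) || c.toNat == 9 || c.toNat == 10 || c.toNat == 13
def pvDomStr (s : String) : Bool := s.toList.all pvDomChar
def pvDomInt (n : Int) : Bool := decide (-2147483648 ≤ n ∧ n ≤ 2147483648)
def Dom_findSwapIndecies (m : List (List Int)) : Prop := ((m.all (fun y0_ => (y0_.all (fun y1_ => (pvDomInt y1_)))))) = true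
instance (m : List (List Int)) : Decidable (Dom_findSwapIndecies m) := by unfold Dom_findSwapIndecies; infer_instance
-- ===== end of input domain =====

-- B replaces A's three passes (forward ordering of stable-then-unstable indices, then an
-- inversion pass assigning positions) by one pass over the stable flags that emits the
-- inverse permutation directly with two running counters; objective: simpler.

-- ===== PORT A =====
def findStableRow (row : List Int) : Bool :=
  match row with
  | [] => true
  | num :: rest => if num ≠ 0 then false else findStableRow rest

def findStable (m : List (List Int)) : List Bool :=
  m.foldl (fun stable row => stable ++ [findStableRow row]) []

def findSwapIndecies (m : List (List Int)) : Int × List Int :=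
  let stable := findStable m
  let oc := (List.range stable.length).foldl
    (fun (acc : List Nat × Int) i =>
      if stable.getD i false then (acc.1 ++ [i], acc.2 + 1) else acc) ([], 0)
  let newOrder := (List.range stable.length).foldl
    (fun (acc : List Nat) i =>
      if !(stable.getD i false) then acc ++ [i] else acc) oc.1
  let swap := (List.range stable.length).foldl
    (fun (s : List Int) i => s.set (newOrder.getD i 0) (i : Int))
    (List.replicate stable.length 0)
  (oc.2, swap)

-- ===== PORT B =====
def findSwapIndecies_alt (m : List (List Int)) : Int × List Int :=
  let flags := m.map (fun row => row.all (fun x => x == 0))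
  let count : Int := (flags.map (fun b => if b then (1 : Int) else 0)).sum
  let r := flags.foldl
    (fun (acc : List Int × Int × Int) f =>
      if f then (acc.1 ++ [acc.2.1], acc.2.1 + 1, acc.2.2)
      else (acc.1 ++ [acc.2.2], acc.2.1, acc.2.2 + 1)) ([], 0, count)
  (count, r.1)

-- ===== PRECONDITION & SPEC =====
def Spec_findSwapIndecies (m : List (List Int)) (out : Int × List Int) : Prop := out = findSwapIndecies_alt m
instance (m : List (List Int)) (out : Int × List Int) : Decidable (Spec_findSwapIndecies m out) := by unfold Spec_findSwapIndecies; infer_instance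

-- ===== CLAIM (what is proved, stated in full; the proofs are below) =====
def Claim_equal_findSwapIndecies : Prop := ∀ (m : List (List Int)), Dom_findSwapIndecies m → Spec_findSwapIndecies m (findSwapIndecies m)
-- ===== LEMMAS AND PROOFS =====

-- row test: A's early-exit scan equals B's all-zero test
theorem findStableRow_eq_all (row : List Int) : findStableRow row = row.all (fun x => x == 0) := by
  induction row with
  | nil => rfl
  | cons x xs ih =>
    by_cases h : x = 0 <;> simp [findStableRow, h, ih]

theorem findStable_eq_map (m : List (List Int)) :
    findStable m = m.map (fun row => row.all (fun x => x == 0)) := by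
  unfold findStable
  rw [PySem.List.foldl_append_singleton_eq_map findStableRow m []]
  simp [findStableRow_eq_all]

-- B's fold: reference recursion over the flags with the two counters
def bspec : List Bool → Int → Int → List Int
  | [], _, _ => []
  | true :: fs, s, u => s :: bspec fs (s + 1) u
  | false :: fs, s, u => u :: bspec fs s (u + 1)

theorem bfold_fst (fs : List Bool) (acc : List Int) (s u : Int) :
    (fs.foldl (fun (acc : List Int × Int × Int) f =>
      if f then (acc.1 ++ [acc.2.1], acc.2.1 + 1, acc.2.2)
      else (acc.1 ++ [acc.2.2], acc.2.1, acc.2.2 + 1)) (acc, s, u)).1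
    = acc ++ bspec fs s u := by
  induction fs generalizing acc s u with
  | nil => simp [bspec]
  | cons f fs ih =>
    cases f <;> simp [bspec, List.foldl_cons, ih]

theorem bspec_length (fs : List Bool) (s u : Int) : (bspec fs s u).length = fs.length := by
  induction fs generalizing s u with
  | nil => rfl
  | cons f fs ih => cases f <;> simp [bspec, ih]

theorem bspec_getD (fs : List Bool) (s u : Int) (j : Nat) (hj : j < fs.length) :
    (bspec fs s u).getD j 0
      = if fs.getD j false then s + ((fs.take j).countP (fun b => b) : Int)
        else u + ((fs.take j).countP (fun b => !b) : Int) := by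
  induction fs generalizing s u j with
  | nil => simp at hj
  | cons f fs ih =>
    cases j with
    | zero => cases f <;> simp [bspec]
    | succ j =>
      have hj' : j < fs.length := by simpa using hj
      cases f <;>
        simp only [bspec, List.getD_cons_succ, List.take_succ_cons, List.countP_cons,
          ih _ _ j hj'] <;>
        split <;> simp <;> push_cast <;> omega

-- A's first fold: ordering prefix and the count together
theorem pairFold (p : Nat → Bool) (l : List Nat) (acc : List Nat × Int) :
    (l.foldl (fun (acc : List Nat × Int) i =>
        if p i then (acc.1 ++ [i], acc.2 + 1) else acc) acc)
    = (acc.1 ++ l.filter p, acc.2 + (l.countP p : Int)) := by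
  induction l generalizing acc with
  | nil => simp
  | cons x xs ih =>
    by_cases h : p x <;>
      simp [List.foldl_cons, List.filter_cons, List.countP_cons, h, ih] <;> push_cast <;> ring

-- count over an index range equals count over the flag prefix
theorem countP_range_getD (fs : List Bool) (q : Bool → Bool) :
    ∀ j, j ≤ fs.length →
      (List.range j).countP (fun i => q (fs.getD i false)) = (fs.take j).countP q := by
  intro j hj
  induction j with
  | zero => simp
  | succ j ih =>
    have hj' : j ≤ fs.length := by omega
    have hjlt : j < fs.length := by omega
    rw [List.range_succ, List.countP_append, ih hj', List.take_succ, List.countP_append]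
    have : fs[j]? = some fs[j] := List.getElem?_eq_getElem hjlt
    simp [this, List.countP_cons, List.getD, List.countP_singleton]

-- the set-fold keeps the length
theorem setfold_length (order : List Nat) (init : List Int) (L : Nat) :
    ((List.range L).foldl (fun (s : List Int) i => s.set (order.getD i 0) (i : Int)) init).length
      = init.length := by
  induction L with
  | zero => simp
  | succ L ih =>
    rw [List.range_succ, List.foldl_append]
    simp only [List.foldl_cons, List.foldl_nil, List.length_set]
    exact ih

theorem nodup_getElem_not_mem_take {l : List Nat} (h : l.Nodup) {L : Nat} (hL : L < l.length) :
    l[L] ∉ l.take L := by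
  intro hmem
  obtain ⟨i, hi, hEq⟩ := List.getElem_of_mem hmem
  have hiL : i < L := by
    have := hi
    simp [List.length_take] at this
    omega
  rw [List.getElem_take] at hEq
  exact absurd ((h.getElem_inj_iff).mp hEq) (by omega)

-- the set-fold computes the inverse permutation: value at j is the position of j in `order`
theorem setfold_getD (order : List Nat) (hnd : order.Nodup) (init : List Int) :
    ∀ L, L ≤ order.length → ∀ j, j < init.length →
      ((List.range L).foldl (fun (s : List Int) i => s.set (order.getD i 0) (i : Int)) init).getD j 0
        = if j ∈ order.take L then ((order.take L).idxOf j : Int) else init.getD j 0 := by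
  intro L hL
  induction L with
  | zero => intro j hj; simp
  | succ L ih =>
    intro j hj
    have hL' : L ≤ order.length := by omega
    have hLlt : L < order.length := by omega
    have hget : order.getD L 0 = order[L] := List.getD_eq_getElem order 0 hLlt
    have htake : order.take (L + 1) = order.take L ++ [order[L]] := by
      rw [List.take_succ, List.getElem?_eq_getElem hLlt]; rfl
    have hnotmem : order[L] ∉ order.take L := nodup_getElem_not_mem_take hnd hLlt
    have hlen :
        ((List.range L).foldl (fun (s : List Int) i => s.set (order.getD i 0) (i : Int)) init).length
          = init.length := setfold_length order init L
    rw [List.range_succ, List.foldl_append]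
    simp only [List.foldl_cons, List.foldl_nil, hget]
    by_cases hje : j = order[L]
    · subst hje
      rw [List.getD_eq_getElem _ 0 (by rw [List.length_set, hlen]; exact hj)]
      rw [List.getElem_set_self]
      rw [htake]
      have hlentake : (order.take L).length = L := by simp [List.length_take]; omega
      rw [if_pos (List.mem_append.mpr (Or.inr (by simp)))]
      rw [List.idxOf_append, if_neg hnotmem]
      simp [hlentake]
    · have hset : ((((List.range L).foldl (fun (s : List Int) i => s.set (order.getD i 0) (i : Int)) init)).set order[L] (L : Int)).getD j 0
          = ((List.range L).foldl (fun (s : List Int) i => s.set (order.getD i 0) (i : Int)) init).getD j 0 := by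
        unfold List.getD
        rw [List.getElem?_set_ne (by omega)]
      rw [hset, ih hL' j hj, htake]
      by_cases hm : j ∈ order.take L
      · have hm' : j ∈ order.take L ++ [order[L]] := List.mem_append.mpr (Or.inl hm)
        rw [if_pos hm, if_pos hm', List.idxOf_append, if_pos hm]
      · have hnm : j ∉ order.take L ++ [order[L]] := by
          intro hc
          rcases List.mem_append.mp hc with hc | hc
          · exact hm hc
          · exact hje (by simpa using hc)
        rw [if_neg hm, if_neg hnm]

-- position of j in a filtered range
theorem idxOf_filter_range (p : Nat → Bool) :
    ∀ n j, j < n → p j → ((List.range n).filter p).idxOf j = (List.range j).countP p := by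
  intro n
  induction n with
  | zero => intro j hj; omega
  | succ n ih =>
    intro j hj hp
    rw [List.range_succ, List.filter_append]
    by_cases hjn : j < n
    · have hmem : j ∈ (List.range n).filter p := by
        simp [List.mem_filter, List.mem_range, hjn, hp]
      rw [List.idxOf_append]
      simp [hmem, ih j hjn hp]
    · have hjeq : j = n := by omega
      subst hjeq
      have hnot : j ∉ (List.range j).filter p := by
        simp [List.mem_filter, List.mem_range]
      rw [List.idxOf_append]
      simp [hnot, hp, ← List.countP_eq_length_filter]

theorem countP_not_add (l : List Nat) (p : Nat → Bool) :
    l.countP p + l.countP (fun x => !p x) = l.length := by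
  induction l with
  | nil => rfl
  | cons x xs ih =>
    cases h : p x <;> simp [List.countP_cons, h] <;> omega

-- the whole computation, as a function of the stable flags
theorem core_eq (fs : List Bool) :
    (let oc := (List.range fs.length).foldl
        (fun (acc : List Nat × Int) i =>
          if fs.getD i false then (acc.1 ++ [i], acc.2 + 1) else acc) ([], 0)
     let newOrder := (List.range fs.length).foldl
        (fun (acc : List Nat) i =>
          if !(fs.getD i false) then acc ++ [i] else acc) oc.1
     let swap := (List.range fs.length).foldl
        (fun (s : List Int) i => s.set (newOrder.getD i 0) (i : Int))
        (List.replicate fs.length 0)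
     ((oc.2, swap) : Int × List Int))
    = (let count : Int := (fs.map (fun b => if b then (1 : Int) else 0)).sum
       let r := fs.foldl
        (fun (acc : List Int × Int × Int) f =>
          if f then (acc.1 ++ [acc.2.1], acc.2.1 + 1, acc.2.2)
          else (acc.1 ++ [acc.2.2], acc.2.1, acc.2.2 + 1)) ([], 0, count)
       ((count, r.1) : Int × List Int)) := by
  have hsum : ((fs.map (fun b => if b then (1 : Int) else 0)).sum : Int)
      = (fs.countP (fun b => b) : Int) := by
    exact PySem.List.sum_map_ite_one_zero (fun b => b) fs
  set n := fs.length with hn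
  set p : Nat → Bool := fun i => fs.getD i false with hp
  set T := (List.range n).filter p with hT
  set F := (List.range n).filter (fun i => !p i) with hF
  have horder : (List.range n).foldl
      (fun (acc : List Nat) i => if !(fs.getD i false) then acc ++ [i] else acc)
      (((List.range n).foldl (fun (acc : List Nat × Int) i =>
          if fs.getD i false then (acc.1 ++ [i], acc.2 + 1) else acc) ([], 0)).1)
      = T ++ F := by
    rw [pairFold p (List.range n) ([], 0)]
    rw [PySem.List.foldl_append_if (fun i => !(fs.getD i false)) (fun i => i) (List.range n)]
    simp [hT, hF, hp, List.map_id']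
  have hcnt : ((List.range n).foldl (fun (acc : List Nat × Int) i =>
      if fs.getD i false then (acc.1 ++ [i], acc.2 + 1) else acc) ([], 0)).2
      = ((List.range n).countP p : Int) := by
    rw [pairFold p (List.range n) ([], 0)]; simp
  have hTlen : T.length = (List.range n).countP p := by
    rw [hT, ← List.countP_eq_length_filter]
  have hFlen : F.length = (List.range n).countP (fun i => !p i) := by
    rw [hF, ← List.countP_eq_length_filter]
  have horderlen : (T ++ F).length = n := by
    rw [List.length_append, hTlen, hFlen, countP_not_add]
    simp
  have hnodup : (T ++ F).Nodup := by
    refine List.Nodup.append ?_ ?_ ?_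
    · exact (List.nodup_range).filter p
    · exact (List.nodup_range).filter _
    · intro a haT haF
      rw [hT, List.mem_filter] at haT
      rw [hF, List.mem_filter] at haF
      simp [haT.2] at haF
  have hmem : ∀ j, j < n → j ∈ T ++ F := by
    intro j hj
    rcases h : p j with _ | _
    · exact List.mem_append.mpr (Or.inr (by rw [hF, List.mem_filter]; simp [List.mem_range, hj, h]))
    · exact List.mem_append.mpr (Or.inl (by rw [hT, List.mem_filter]; simp [List.mem_range, hj, h]))
  have hsf_len : ((List.range n).foldl
      (fun (s : List Int) i => s.set ((T ++ F).getD i 0) (i : Int))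
      (List.replicate n 0)).length = n := by
    rw [setfold_length]; simp
  have hcount_bridge : (List.range n).countP p = fs.countP (fun b => b) := by
    have := countP_range_getD fs (fun b => b) n (le_refl _)
    simpa [hp, hn, List.take_length] using this
  have hA_elt : ∀ j, j < n →
      ((List.range n).foldl (fun (s : List Int) i => s.set ((T ++ F).getD i 0) (i : Int))
        (List.replicate n 0)).getD j 0
      = if fs.getD j false then ((List.range j).countP p : Int)
        else ((List.range n).countP p : Int) + ((List.range j).countP (fun i => !p i) : Int) := by
    intro j hj
    have htake_all : List.take n (T ++ F) = T ++ F := by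
      rw [← horderlen]; exact List.take_length
    have h1 := setfold_getD (T ++ F) hnodup (List.replicate n 0)
        (T ++ F).length (le_refl _) j (by simpa using hj)
    rw [horderlen, htake_all] at h1
    rw [h1]
    have hjmem := hmem j hj
    rw [if_pos hjmem]
    rcases h : p j with _ | _
    · -- unstable row: j is in F
      have hjT : j ∉ T := by
        rw [hT, List.mem_filter]; simp [h]
      have hjF : ((F.idxOf j : Nat) : Nat) = (List.range j).countP (fun i => !p i) := by
        rw [hF]; exact idxOf_filter_range (fun i => !p i) n j hj (by simp [h])
      rw [List.idxOf_append, if_neg hjT, hjF, hTlen]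
      have : fs.getD j false = false := h
      rw [this]
      push_cast
      ring
    · have hjT : j ∈ T := by
        rw [hT, List.mem_filter]; simp [List.mem_range, hj, h]
      rw [List.idxOf_append, if_pos hjT, hT, idxOf_filter_range p n j hj h]
      have : fs.getD j false = true := h
      rw [this]
      simp
  have hB_elt : ∀ j, j < n →
      (bspec fs 0 ((fs.countP (fun b => b) : Int))).getD j 0
      = if fs.getD j false then ((List.range j).countP p : Int)
        else ((List.range n).countP p : Int) + ((List.range j).countP (fun i => !p i) : Int) := by
    intro j hj
    rw [bspec_getD fs _ _ j (by omega)]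
    have ht : (List.range j).countP p = (fs.take j).countP (fun b => b) := by
      simpa [hp] using countP_range_getD fs (fun b => b) j (by omega)
    have hf : (List.range j).countP (fun i => !p i) = (fs.take j).countP (fun b => !b) := by
      simpa [hp] using countP_range_getD fs (fun b => !b) j (by omega)
    rcases h : fs.getD j false with _ | _
    · simp only [Bool.false_eq_true, if_false]
      rw [← hf, hcount_bridge]
    · simp only [if_true]
      rw [← ht]
      simp
  -- assemble
  simp only []
  rw [Prod.mk.injEq]
  constructor
  · rw [hcnt, hsum, hcount_bridge]
  · rw [horder, hsum, bfold_fst fs [] 0 _, List.nil_append]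
    apply List.ext_getElem
    · rw [hsf_len, bspec_length]
    · intro j h1 h2
      have hjn : j < n := by rw [hsf_len] at h1; exact h1
      rw [← List.getD_eq_getElem _ 0 h1, ← List.getD_eq_getElem _ 0 h2]
      rw [hA_elt j hjn, hB_elt j hjn]

-- ===== VERDICT (by name: the statement is the Claim_ definition above) =====
theorem findSwapIndecies_spec : Claim_equal_findSwapIndecies := by
  intro m _
  unfold Spec_findSwapIndecies findSwapIndecies findSwapIndecies_alt
  rw [findStable_eq_map]
  generalize (m.map (fun row => row.all (fun x => x == 0))) = fs
  exact core_eq fs
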